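-- pv_equiv track=rewrite | github.com/zeniverse/-algorithm-practice | Programmers/Level2/프렌즈4블록(1).py | solution
-- ===== SOURCE A (Python) =====
-- directions = [(0, 1), (1, 0), (1, 1)]
--
-- def count(m, n, board, x, y, alpha):
--     cnt = 0
--     for x_, y_ in directions:
--         if x + x_ < m and y + y_ < n:
--             if board[x + x_][y + y_] == alpha and board[x + x_][y + y_] != 0:
--                 cnt += 1
--
--     if cnt == 3:
--         return True
--     return False
--
-- def move(m, n, board, arr):
--     for i in range(m-1, -1, -1):
--         for j in range(n-1, -1, -1):
--             if arr[i][j] == 1: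
--                 board[i][j] = 0
--                 for k in range(i, -1, -1):
--                     if arr[k][j] == 0:
--                         board[i][j] = board[k][j]
--                         board[k][j] = 0
--                         arr[k][j] = 1
--                         break
--
-- def check(m, n, board):
--     arr = [[0 for _ in range(n)] for _ in range(m)]
--     flag = False
--
--     for i in range(m):
--         for j in range(n):
--             if count(m, n, board, i, j, board[i][j]):
--                 flag = True
--                 arr[i][j] = 1
--                 for x, y in directions:
--                     if i + x < m and j + y < n:
--                         arr[i + x][j + y] = 1
--
--     if flag:
--         move(m, n, board, arr)
--
--     return flag
--
-- def solution(m, n, board):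
--     board = [list(i) for i in board]
--     res = 0
--     flag = True
--
--     while flag:
--         flag = check(m, n, board)
--
--     for i in board:
--         res += i.count(0)
--
--     return res
-- ===== SOURCE B (Python) =====
-- def solution(m, n, board):
--     # Column-major simulation: cols[j][i] is the cell at row i, column j; None marks an
--     # emptied cell.  Each round collects every 2x2 same-letter block into a `removed`
--     # set, then gravity rebuilds each column as Nones stacked on top of the survivors.
--     if m > 0 and n > 0:
--         cols = [[board[i][j] for i in range(m)] for j in range(n)]
--     else:
--         cols = []
--     while True:
--         removed = set()
--         for j in range(len(cols) - 1):
--             for i in range(m - 1):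
--                 v = cols[j][i]
--                 if v is not None and v == cols[j][i + 1] == cols[j + 1][i] == cols[j + 1][i + 1]:
--                     removed.update({(i, j), (i + 1, j), (i, j + 1), (i + 1, j + 1)})
--         if not removed:
--             break
--         new_cols = []
--         for j, col in enumerate(cols):
--             survivors = [col[i] for i in range(m) if (i, j) not in removed]
--             new_cols.append([None] * (m - len(survivors)) + survivors)
--         cols = new_cols
--     return sum(col.count(None) for col in cols)
-- ===== Notes on version B (the rewrite author's own statement) =====
-- stated objective: simpler
-- what changed: B replaces A's mark-matrix plus in-place bottom-up cell-pulling gravity with a column-major board where each round collects all 2x2 blocks into a removed-set and gravity simply rebuilds every column as Nones prepended to the surviving cells; the answer is the count of empty cells at the end.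
import Mathlib
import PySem

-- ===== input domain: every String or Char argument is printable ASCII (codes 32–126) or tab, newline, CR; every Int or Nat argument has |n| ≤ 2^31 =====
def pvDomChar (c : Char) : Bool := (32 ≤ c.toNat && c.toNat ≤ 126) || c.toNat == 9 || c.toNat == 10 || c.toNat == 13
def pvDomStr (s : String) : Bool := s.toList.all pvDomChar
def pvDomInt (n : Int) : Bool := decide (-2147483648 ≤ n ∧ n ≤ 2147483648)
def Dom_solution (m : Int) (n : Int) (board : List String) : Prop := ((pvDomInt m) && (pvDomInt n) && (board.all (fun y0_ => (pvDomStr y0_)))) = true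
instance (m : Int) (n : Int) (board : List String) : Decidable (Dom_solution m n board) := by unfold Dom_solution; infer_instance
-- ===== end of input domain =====

-- B replaces A's mark-matrix + in-place bottom-up cell-pulling gravity by a column-major
-- board, a removed-set of 2x2 block cells, and gravity as a per-column rebuild (simpler
-- decomposition; same results).  A mutates its local copy of the board only; the return
-- value is what is compared.

-- ===== PORT A =====
-- Python A copies `board` into a mutable list of lists whose cells are chars or the int 0;
-- the port carries that matrix as a function Int → Int → Option Char (`none` = the int 0
-- written into emptied cells) and every Python write is a function update at the same index.
abbrev PvCell := Option Char

def pvDirections : List (Int × Int) := [(0, 1), (1, 0), (1, 1)]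

def pvGrid0 (board : List String) : Int → Int → PvCell :=
  fun i j =>
    match PySem.List.pyGet? board i with
    | some s => PySem.List.pyGet? s.toList j
    | none => none   -- out of range: never read under Pre_solution

def pvUpd2 {α : Type} (f : Int → Int → α) (i j : Int) (v : α) : Int → Int → α :=
  fun i' j' => if i' = i ∧ j' = j then v else f i' j'

-- count(m, n, board, x, y, alpha)
def pvCount (m n : Int) (f : Int → Int → PvCell) (x y : Int) (alpha : PvCell) : Bool :=
  let cnt := pvDirections.foldl (fun cnt d =>
      if x + d.1 < m ∧ y + d.2 < n then
        if f (x + d.1) (y + d.2) = alpha ∧ f (x + d.1) (y + d.2) ≠ none then cnt + 1 else cnt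
      else cnt) (0 : Int)
  cnt == 3

-- body of move's j-loop
def pvMoveStep (st : (Int → Int → PvCell) × (Int → Int → Int)) (i j : Int) :
    (Int → Int → PvCell) × (Int → Int → Int) :=
  if st.2 i j = 1 then
    let f1 := pvUpd2 st.1 i j none
    match (PySem.List.pyRange i (-1) (-1)).find? (fun k => st.2 k j == 0) with
    | some k => (pvUpd2 (pvUpd2 f1 i j (f1 k j)) k j none, pvUpd2 st.2 k j 1)
    | none => (f1, st.2)
  else st

-- move(m, n, board, arr)
def pvMove (m n : Int) (st : (Int → Int → PvCell) × (Int → Int → Int)) :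
    (Int → Int → PvCell) × (Int → Int → Int) :=
  (PySem.List.pyRange (m - 1) (-1) (-1)).foldl (fun st i =>
    (PySem.List.pyRange (n - 1) (-1) (-1)).foldl (fun st j => pvMoveStep st i j) st) st

-- body of check's j-loop (flag, arr)
def pvMarkCell (m n : Int) (f : Int → Int → PvCell)
    (st : Bool × (Int → Int → Int)) (i j : Int) : Bool × (Int → Int → Int) :=
  if pvCount m n f i j (f i j) then
    let a1 := pvUpd2 st.2 i j 1
    let a2 := pvDirections.foldl (fun a d =>
        if i + d.1 < m ∧ j + d.2 < n then pvUpd2 a (i + d.1) (j + d.2) 1 else a) a1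
    (true, a2)
  else st

-- check(m, n, board): arr = [[0]*n]*m read/written only inside the m×n region,
-- carried as the everywhere-0 function
def pvCheck (m n : Int) (f : Int → Int → PvCell) : Bool × (Int → Int → PvCell) :=
  let fa := (PySem.List.pyRange 0 m 1).foldl (fun st i =>
      (PySem.List.pyRange 0 n 1).foldl (fun st j => pvMarkCell m n f st i j) st)
      (false, fun _ _ => (0 : Int))
  if fa.1 then (true, (pvMove m n (f, fa.2)).1) else (false, f)

-- `while flag:`; fuel m*n+1 exceeds the possible number of rounds (each true round
-- empties at least four of the m*n cells)
def pvLoopA : Nat → Int → Int → (Int → Int → PvCell) → (Int → Int → PvCell)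
  | 0, _, _, f => f
  | fu + 1, m, n, f =>
    let r := pvCheck m n f
    if r.1 then pvLoopA fu m n r.2 else r.2

def solution (m : Int) (n : Int) (board : List String) : Int :=
  let f := pvLoopA (m.toNat * n.toNat + 1) m n (pvGrid0 board)
  -- for i in board: res += i.count(0)   (row i's length never changes)
  (List.range board.length).foldl (fun (res : Int) (i : Nat) =>
    res + (((List.range (board.getD i "").toList.length).countP
      (fun (j : Nat) => f (i : Int) (j : Int) = none) : Nat) : Int)) 0

-- ===== PORT B =====
-- Source B: cols[j][i] is the cell at row i of column j; None (= none) marks emptied cells.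
def pvColsOf (m n : Int) (board : List String) : List (List PvCell) :=
  if 0 < m ∧ 0 < n then
    (List.range n.toNat).map (fun j =>
      (List.range m.toNat).map (fun i => some ((board.getD i "").toList.getD j ' ')))
      -- board[i][j] is in range under Pre_solution; the getD defaults are never used there
  else []

def pvBlocks (m : Int) (cols : List (List PvCell)) : PySem.Set (Int × Int) :=
  (List.range (cols.length - 1)).foldl (fun r j =>
    (List.range (m - 1).toNat).foldl (fun r i =>
      let cj := cols.getD j []
      let cj1 := cols.getD (j + 1) []
      let v := cj.getD i none
      if v ≠ none ∧ v = cj.getD (i + 1) none ∧ v = cj1.getD i none ∧ v = cj1.getD (i + 1) none then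
        PySem.Set.update r [((i : Int), (j : Int)), ((i : Int) + 1, (j : Int)),
                            ((i : Int), (j : Int) + 1), ((i : Int) + 1, (j : Int) + 1)]
      else r) r) PySem.Set.empty

def pvRebuild (m : Int) (cols : List (List PvCell)) (removed : PySem.Set (Int × Int)) :
    List (List PvCell) :=
  (PySem.List.enumerate cols).map (fun p =>
    let survivors := ((List.range m.toNat).filter
        (fun (i : Nat) => !(PySem.Set.contains removed ((i : Int), p.1)))).map (fun (i : Nat) => p.2.getD i none)
    List.replicate (m.toNat - survivors.length) none ++ survivors)

-- `while True: … if not removed: break`; same fuel bound as A's port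
def pvLoopB : Nat → Int → List (List PvCell) → List (List PvCell)
  | 0, _, cols => cols
  | fu + 1, m, cols =>
    let removed := pvBlocks m cols
    if removed = [] then cols else pvLoopB fu m (pvRebuild m cols removed)

def solution_alt (m : Int) (n : Int) (board : List String) : Int :=
  let cols := pvLoopB (m.toNat * n.toNat + 1) m (pvColsOf m n board)
  cols.foldl (fun res col => res + ((col.count none : Nat) : Int)) 0

-- ===== PRECONDITION & SPEC =====
-- A raises IndexError when the board is smaller than the announced m×n region;
-- Pre_solution excludes exactly that (for m ≤ 0 or n ≤ 0 nothing is indexed).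
def Pre_solution (m : Int) (n : Int) (board : List String) : Prop :=
  0 < m → 0 < n →
    (m ≤ (board.length : Int) ∧
     ∀ i : Nat, i < m.toNat → n ≤ ((board.getD i "").toList.length : Int))
instance (m : Int) (n : Int) (board : List String) : Decidable (Pre_solution m n board) := by
  unfold Pre_solution; infer_instance

def pvWitness_solution : Int × Int × List String := (2, 2, ["AB", "CD"])

def Spec_solution (m : Int) (n : Int) (board : List String) (out : Int) : Prop := out = solution_alt m n board
instance (m : Int) (n : Int) (board : List String) (out : Int) : Decidable (Spec_solution m n board out) := by unfold Spec_solution; infer_instance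

-- ===== CLAIM (what is proved, stated in full; the proofs are below) =====
def Claim_equal_solution : Prop := ∀ (m : Int) (n : Int) (board : List String), Dom_solution m n board → Pre_solution m n board → Spec_solution m n board (solution m n board)


-- ===== LEMMAS AND PROOFS =====

-- the m×n region, the 2×2-block predicate, the removal mask, and the A↔B state relation
def pvReg (m n i j : Int) : Prop := 0 ≤ i ∧ i < m ∧ 0 ≤ j ∧ j < n

def pvBase (m n : Int) (f : Int → Int → PvCell) (bi bj : Int) : Prop :=
  bi + 1 < m ∧ bj + 1 < n ∧ f bi bj ≠ none ∧
  f (bi + 1) bj = f bi bj ∧ f bi (bj + 1) = f bi bj ∧ f (bi + 1) (bj + 1) = f bi bj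

def pvMark (m n : Int) (f : Int → Int → PvCell) (i j : Int) : Prop :=
  ∃ bi bj, 0 ≤ bi ∧ 0 ≤ bj ∧ pvBase m n f bi bj ∧ (i = bi ∨ i = bi + 1) ∧ (j = bj ∨ j = bj + 1)

def pvRel (m n : Int) (board : List String) (f : Int → Int → PvCell)
    (cols : List (List PvCell)) : Prop :=
  cols.length = n.toNat ∧ (∀ col ∈ cols, col.length = m.toNat) ∧
  (∀ i j : Int, pvReg m n i j → f i j = (cols.getD j.toNat []).getD i.toNat none) ∧
  (∀ i j : Int, ¬ pvReg m n i j → f i j = pvGrid0 board i j)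

def pvSurv (f : Int → Int → PvCell) (a : Int → Int → Int) (c : Nat) (j : Int) : List PvCell :=
  ((List.range c).filter (fun k : Nat => a (k : Int) j == 0)).map (fun k : Nat => f (k : Int) j)

def pvInner (n : Int) (st : (Int → Int → PvCell) × (Int → Int → Int)) (i : Int) :
    (Int → Int → PvCell) × (Int → Int → Int) :=
  (PySem.List.pyRange (n - 1) (-1) (-1)).foldl (fun st j => pvMoveStep st i j) st

def pvRun (n : Int) (c : Nat) (st : (Int → Int → PvCell) × (Int → Int → Int)) :
    (Int → Int → PvCell) × (Int → Int → Int) :=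
  (PySem.List.pyRange ((c : Int) - 1) (-1) (-1)).foldl (pvInner n) st

lemma pvUpd2_same {α : Type} (f : Int → Int → α) (i j : Int) (v : α) :
    pvUpd2 f i j v i j = v := by simp [pvUpd2]

lemma pvUpd2_ne {α : Type} (f : Int → Int → α) (i j i' j' : Int) (v : α)
    (h : ¬ (i' = i ∧ j' = j)) : pvUpd2 f i j v i' j' = f i' j' := by
  simp [pvUpd2, h]

lemma pvGrid0_isSome (board : List String) (i j : Nat)
    (hi : i < board.length) (hj : j < (board.getD i "").toList.length) :
    pvGrid0 board (i : Int) (j : Int) ≠ none := by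
  have hg : board.getD i "" = board[i] := by
    rw [List.getD_eq_getElem?_getD, List.getElem?_eq_getElem hi]; rfl
  unfold pvGrid0
  rw [PySem.List.pyGet?_natCast, List.getElem?_eq_getElem hi]
  show PySem.List.pyGet? (board[i].toList) (j : Int) ≠ none
  rw [hg] at hj
  rw [PySem.List.pyGet?_natCast, List.getElem?_eq_getElem hj]
  simp

-- foldl of +(cast count) is the sum of the counts
lemma pvFoldlAdd {α : Type} (L : List α) (g : α → Nat) (c : Int) :
    L.foldl (fun res x => res + ((g x : Nat) : Int)) c = c + ((L.map g).sum : Nat) := by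
  induction L generalizing c with
  | nil => simp
  | cons x L ih => simp [List.foldl_cons, ih, List.map_cons, List.sum_cons]; ring

lemma pvCountP_range {α : Type} (l : List α) (p : α → Bool) (d : α) :
    l.countP p = (List.range l.length).countP (fun i => p (l.getD i d)) := by
  induction l with
  | nil => simp
  | cons x l ih =>
      rw [List.length_cons, List.range_succ_eq_map, List.countP_cons, List.countP_cons,
        List.countP_map, ih]
      simp [Function.comp_def]

lemma pvCount_iff (m n : Int) (f : Int → Int → PvCell) (x y : Int) :
    (pvCount m n f x y (f x y) = true) ↔ pvBase m n f x y := by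
  unfold pvCount pvDirections pvBase
  simp only [List.foldl_cons, List.foldl_nil, add_zero]
  constructor
  · intro h
    split_ifs at h with h1 h2 h3 h4 h5 h6 <;>
      first
        | (exfalso; revert h; decide)
        | (exact ⟨by omega, by omega, fun hn => h4.2 (h4.1.trans hn), h4.1, h6.1, h2.1⟩)
  · rintro ⟨him, hjn, hne, h10, h01, h11⟩
    split_ifs with h1 h2 h3 h4 h5 h6 <;> first | decide | (exfalso; simp_all <;> omega)

lemma pvMarkCell_spec (m n : Int) (f : Int → Int → PvCell) (st : Bool × (Int → Int → Int))
    (i j : Int) :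
    ((pvMarkCell m n f st i j).1 = true ↔ (st.1 = true ∨ pvBase m n f i j)) ∧
    (∀ i' j', ((pvMarkCell m n f st i j).2 i' j' = 1 ↔
        (st.2 i' j' = 1 ∨ (pvBase m n f i j ∧ (i' = i ∨ i' = i + 1) ∧ (j' = j ∨ j' = j + 1)))) ∧
      ((pvMarkCell m n f st i j).2 i' j' = st.2 i' j' ∨ (pvMarkCell m n f st i j).2 i' j' = 1)) := by
  unfold pvMarkCell
  by_cases hc : pvBase m n f i j
  · rw [if_pos ((pvCount_iff m n f i j).mpr hc)]
    have hb1 : i + (0:Int) < m ∧ j + 1 < n := by obtain ⟨h1,h2,_⟩ := hc; constructor <;> omega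
    have hb2 : i + (1:Int) < m ∧ j + 0 < n := by obtain ⟨h1,h2,_⟩ := hc; constructor <;> omega
    have hb3 : i + (1:Int) < m ∧ j + 1 < n := by obtain ⟨h1,h2,_⟩ := hc; constructor <;> omega
    simp only [pvDirections, List.foldl_cons, List.foldl_nil, if_pos hb1, if_pos hb2, if_pos hb3]
    refine ⟨by simp [hc], fun i' j' => ?_⟩
    constructor
    · simp only [pvUpd2, add_zero]
      split_ifs <;> simp_all <;> tauto
    · simp only [pvUpd2, add_zero]
      split_ifs <;> simp
  · rw [if_neg (fun hcnt => hc ((pvCount_iff m n f i j).mp hcnt))]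
    exact ⟨by simp [hc], fun i' j' => ⟨by simp [hc], Or.inl rfl⟩⟩

lemma pvPyRange_toNat (z : Int) :
    PySem.List.pyRange 0 z 1 = PySem.List.pyRange 0 (z.toNat : Int) 1 := by
  rcases le_or_gt z 0 with h | h
  · rw [PySem.List.pyRange_one_eq_nil h, PySem.List.pyRange_one_eq_nil (by omega)]
  · rw [Int.toNat_of_nonneg (by omega)]

def pvMRow (m n : Int) (f : Int → Int → PvCell) (i : Int) (b : Int)
    (st : Bool × (Int → Int → Int)) : Bool × (Int → Int → Int) :=
  (PySem.List.pyRange 0 b 1).foldl (fun st j => pvMarkCell m n f st i j) st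

def pvMGrid (m n : Int) (f : Int → Int → PvCell) (a0 : Int)
    (st : Bool × (Int → Int → Int)) : Bool × (Int → Int → Int) :=
  (PySem.List.pyRange 0 a0 1).foldl (fun st i => pvMRow m n f i n st) st

lemma pvMRow_spec (m n : Int) (f : Int → Int → PvCell) (i : Int) (b : Nat)
    (st : Bool × (Int → Int → Int)) :
    ((pvMRow m n f i (b : Int) st).1 = true ↔
      (st.1 = true ∨ ∃ bj : Nat, bj < b ∧ pvBase m n f i (bj : Int))) ∧
    (∀ i' j',
      ((pvMRow m n f i (b : Int) st).2 i' j' = 1 ↔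
        (st.2 i' j' = 1 ∨ ∃ bj : Nat, bj < b ∧ pvBase m n f i (bj : Int) ∧
           (i' = i ∨ i' = i + 1) ∧ (j' = (bj : Int) ∨ j' = (bj : Int) + 1))) ∧
      ((pvMRow m n f i (b : Int) st).2 i' j' = st.2 i' j' ∨
       (pvMRow m n f i (b : Int) st).2 i' j' = 1)) := by
  induction b generalizing st with
  | zero =>
      unfold pvMRow
      rw [show ((0:Nat):Int) = 0 from rfl, PySem.List.pyRange_one_eq_nil (by norm_num)]
      simp
  | succ b ih =>
      have hcast : ((b + 1 : Nat) : Int) = (b : Int) + 1 := by push_cast; ring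
      have hsplit : pvMRow m n f i ((b+1 : Nat) : Int) st
          = pvMarkCell m n f (pvMRow m n f i (b : Int) st) i (b : Int) := by
        unfold pvMRow
        rw [hcast, PySem.List.pyRange_one_succ_right (by positivity), List.foldl_append]
        simp
      rw [hsplit]
      obtain ⟨ih1, ih2⟩ := ih st
      obtain ⟨c1, c2⟩ := pvMarkCell_spec m n f (pvMRow m n f i (b : Int) st) i (b : Int)
      refine ⟨?_, fun i' j' => ?_⟩
      · rw [c1, ih1]
        constructor
        · rintro ((h | ⟨bj, hbj, hb⟩) | h)
          · exact Or.inl h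
          · exact Or.inr ⟨bj, by omega, hb⟩
          · exact Or.inr ⟨b, by omega, h⟩
        · rintro (h | ⟨bj, hbj, hb⟩)
          · exact Or.inl (Or.inl h)
          · rcases Nat.lt_succ_iff_lt_or_eq.mp hbj with h' | rfl
            · exact Or.inl (Or.inr ⟨bj, h', hb⟩)
            · exact Or.inr hb
      · obtain ⟨d1, d2⟩ := c2 i' j'
        obtain ⟨e1, e2⟩ := ih2 i' j'
        constructor
        · rw [d1, e1]
          constructor
          · rintro ((h | ⟨bj, hbj, hb⟩) | ⟨hb, hi', hj'⟩)
            · exact Or.inl h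
            · exact Or.inr ⟨bj, by omega, hb⟩
            · exact Or.inr ⟨b, by omega, hb, hi', hj'⟩
          · rintro (h | ⟨bj, hbj, hb, hi', hj'⟩)
            · exact Or.inl (Or.inl h)
            · rcases Nat.lt_succ_iff_lt_or_eq.mp hbj with h' | rfl
              · exact Or.inl (Or.inr ⟨bj, h', hb, hi', hj'⟩)
              · exact Or.inr ⟨hb, hi', hj'⟩
        · rcases d2 with h | h
          · rw [h]; exact e2
          · exact Or.inr h

lemma pvMGrid_spec (m n : Int) (f : Int → Int → PvCell) (a0 : Nat)
    (st : Bool × (Int → Int → Int)) :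
    ((pvMGrid m n f (a0 : Int) st).1 = true ↔
      (st.1 = true ∨ ∃ bi bj : Nat, bi < a0 ∧ pvBase m n f (bi : Int) (bj : Int))) ∧
    (∀ i' j',
      ((pvMGrid m n f (a0 : Int) st).2 i' j' = 1 ↔
        (st.2 i' j' = 1 ∨ ∃ bi bj : Nat, bi < a0 ∧ pvBase m n f (bi : Int) (bj : Int) ∧
           (i' = (bi : Int) ∨ i' = (bi : Int) + 1) ∧ (j' = (bj : Int) ∨ j' = (bj : Int) + 1))) ∧
      ((pvMGrid m n f (a0 : Int) st).2 i' j' = st.2 i' j' ∨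
       (pvMGrid m n f (a0 : Int) st).2 i' j' = 1)) := by
  induction a0 generalizing st with
  | zero =>
      unfold pvMGrid
      rw [show ((0:Nat):Int) = 0 from rfl, PySem.List.pyRange_one_eq_nil (by norm_num)]
      simp
  | succ a0 ih =>
      have hcast : ((a0 + 1 : Nat) : Int) = (a0 : Int) + 1 := by push_cast; ring
      have hsplit : pvMGrid m n f ((a0+1 : Nat) : Int) st
          = pvMRow m n f (a0 : Int) n (pvMGrid m n f (a0 : Int) st) := by
        unfold pvMGrid
        rw [hcast, PySem.List.pyRange_one_succ_right (by positivity), List.foldl_append]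
        simp
      rw [hsplit]
      obtain ⟨ih1, ih2⟩ := ih st
      have hrow : pvMRow m n f (a0 : Int) n (pvMGrid m n f (a0 : Int) st)
          = pvMRow m n f (a0 : Int) ((n.toNat : Nat) : Int) (pvMGrid m n f (a0 : Int) st) := by
        unfold pvMRow; rw [← pvPyRange_toNat]
      rw [hrow]
      obtain ⟨c1, c2⟩ := pvMRow_spec m n f (a0 : Int) n.toNat (pvMGrid m n f (a0 : Int) st)
      have hbase : ∀ bj : Nat, pvBase m n f (a0 : Int) (bj : Int) → bj < n.toNat := by
        intro bj hb; have := hb.2.1; omega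
      refine ⟨?_, fun i' j' => ?_⟩
      · rw [c1, ih1]
        constructor
        · rintro ((h | ⟨bi, bj, hbi, hb⟩) | ⟨bj, hbj, hb⟩)
          · exact Or.inl h
          · exact Or.inr ⟨bi, bj, by omega, hb⟩
          · exact Or.inr ⟨a0, bj, by omega, hb⟩
        · rintro (h | ⟨bi, bj, hbi, hb⟩)
          · exact Or.inl (Or.inl h)
          · rcases Nat.lt_succ_iff_lt_or_eq.mp hbi with h' | rfl
            · exact Or.inl (Or.inr ⟨bi, bj, h', hb⟩)
            · exact Or.inr ⟨bj, hbase bj hb, hb⟩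
      · obtain ⟨d1, d2⟩ := c2 i' j'
        obtain ⟨e1, e2⟩ := ih2 i' j'
        constructor
        · rw [d1, e1]
          constructor
          · rintro ((h | ⟨bi, bj, hbi, hb⟩) | ⟨bj, hbj, hb, hi', hj'⟩)
            · exact Or.inl h
            · exact Or.inr ⟨bi, bj, by omega, hb⟩
            · exact Or.inr ⟨a0, bj, by omega, hb, hi', hj'⟩
          · rintro (h | ⟨bi, bj, hbi, hb, hi', hj'⟩)
            · exact Or.inl (Or.inl h)
            · rcases Nat.lt_succ_iff_lt_or_eq.mp hbi with h' | rfl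
              · exact Or.inl (Or.inr ⟨bi, bj, h', hb, hi', hj'⟩)
              · exact Or.inr ⟨bj, hbase bj hb, hb, hi', hj'⟩
        · rcases d2 with h | h
          · rw [h]; exact e2
          · exact Or.inr h

lemma pvCheck_spec (m n : Int) (f : Int → Int → PvCell) :
    ((pvCheck m n f).1 = true ↔ ∃ bi bj : Int, 0 ≤ bi ∧ 0 ≤ bj ∧ pvBase m n f bi bj) ∧
    ((pvCheck m n f).1 = false → (pvCheck m n f).2 = f) ∧
    ((pvCheck m n f).1 = true →
      ∃ a : Int → Int → Int, (∀ i j, a i j = 0 ∨ a i j = 1) ∧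
        (∀ i j, (a i j = 1 ↔ pvMark m n f i j)) ∧
        (pvCheck m n f).2 = (pvMove m n (f, a)).1) := by
  classical
  set st0 : Bool × (Int → Int → Int) := (false, fun _ _ => (0:Int)) with hst0
  set g := pvMGrid m n f ((m.toNat : Nat) : Int) st0 with hgdef
  have hchk : pvCheck m n f =
      (if g.1 = true then (true, (pvMove m n (f, g.2)).1) else (false, f)) := by
    have hmg : pvMGrid m n f ((m.toNat : Nat) : Int) st0 = pvMGrid m n f m st0 := by
      unfold pvMGrid; rw [← pvPyRange_toNat]
    rw [hgdef, hmg]; rfl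
  obtain ⟨s1, s2⟩ := pvMGrid_spec m n f m.toNat st0
  have hIff : g.1 = true ↔ ∃ bi bj : Int, 0 ≤ bi ∧ 0 ≤ bj ∧ pvBase m n f bi bj := by
    rw [hgdef, s1]
    constructor
    · rintro (h | ⟨bi, bj, hbi, hb⟩)
      · simp [hst0] at h
      · exact ⟨(bi : Int), (bj : Int), Int.natCast_nonneg bi, Int.natCast_nonneg bj, hb⟩
    · rintro ⟨bi, bj, hbi0, hbj0, hb⟩
      refine Or.inr ⟨bi.toNat, bj.toNat, by have := hb.1; omega, ?_⟩
      rwa [Int.toNat_of_nonneg hbi0, Int.toNat_of_nonneg hbj0]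
  have h1 : (pvCheck m n f).1 = g.1 := by
    rw [hchk]; split_ifs with h <;> simp [h]
  refine ⟨h1 ▸ hIff, ?_, ?_⟩
  · intro hf
    rw [hchk, if_neg (by rw [← h1]; simp [hf])]
  · intro ht
    refine ⟨g.2, ?_, ?_, ?_⟩
    · intro i j
      rcases (s2 i j).2 with h | h
      · left; rw [hgdef, h]
      · right; rw [hgdef, h]
    · intro i j
      rw [hgdef, (s2 i j).1]
      unfold pvMark
      constructor
      · rintro (h | ⟨bi, bj, hbi, hb, hc1, hc2⟩)
        · simp [hst0] at h
        · exact ⟨(bi : Int), (bj : Int), Int.natCast_nonneg bi, Int.natCast_nonneg bj, hb, hc1, hc2⟩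
      · rintro ⟨bi, bj, hbi0, hbj0, hb, hc1, hc2⟩
        refine Or.inr ⟨bi.toNat, bj.toNat, by have := hb.1; omega, ?_⟩
        rw [Int.toNat_of_nonneg hbi0, Int.toNat_of_nonneg hbj0]
        exact ⟨hb, hc1, hc2⟩
    · rw [hchk, if_pos (by rw [← h1]; exact ht)]


-- ---- gravity (move) machinery ----

lemma pvMoveStep_frame_col (st : (Int → Int → PvCell) × (Int → Int → Int)) (i j j' : Int)
    (h : j' ≠ j) (r : Int) :
    (pvMoveStep st i j').1 r j = st.1 r j ∧ (pvMoveStep st i j').2 r j = st.2 r j := by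
  unfold pvMoveStep
  by_cases h1 : st.2 i j' = 1
  · rw [if_pos h1]
    cases hf : (PySem.List.pyRange i (-1) (-1)).find? (fun k => st.2 k j' == 0) with
    | none =>
        dsimp only
        exact ⟨pvUpd2_ne _ _ _ _ _ _ (fun hh => h (hh.2.symm)), rfl⟩
    | some k =>
        dsimp only
        refine ⟨?_, pvUpd2_ne _ _ _ _ _ _ (fun hh => h (hh.2.symm))⟩
        rw [pvUpd2_ne _ _ _ _ _ _ (fun hh => h (hh.2.symm)),
          pvUpd2_ne _ _ _ _ _ _ (fun hh => h (hh.2.symm)),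
          pvUpd2_ne _ _ _ _ _ _ (fun hh => h (hh.2.symm))]
  · rw [if_neg h1]
    exact ⟨rfl, rfl⟩

lemma pvMoveStep_congr (st st' : (Int → Int → PvCell) × (Int → Int → Int)) (i j : Int)
    (h1 : ∀ r, st.1 r j = st'.1 r j) (h2 : ∀ r, st.2 r j = st'.2 r j) (r : Int) :
    (pvMoveStep st i j).1 r j = (pvMoveStep st' i j).1 r j ∧
    (pvMoveStep st i j).2 r j = (pvMoveStep st' i j).2 r j := by
  unfold pvMoveStep
  rw [h2 i]
  by_cases hc : st'.2 i j = 1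
  · rw [if_pos hc, if_pos hc]
    have hq : (fun k => st.2 k j == 0) = (fun k => st'.2 k j == 0) := by
      funext k; rw [h2 k]
    rw [hq]
    cases hf : (PySem.List.pyRange i (-1) (-1)).find? (fun k => st'.2 k j == 0) with
    | none =>
        dsimp only
        refine ⟨?_, h2 r⟩
        unfold pvUpd2
        split_ifs with hh
        · rfl
        · exact h1 r
    | some k =>
        dsimp only
        constructor
        · unfold pvUpd2
          split_ifs <;> first | rfl | exact h1 _
        · unfold pvUpd2
          split_ifs <;> first | rfl | exact h2 _
  · rw [if_neg hc, if_neg hc]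
    exact ⟨h1 r, h2 r⟩

lemma pvMoveStep_frame_row (st : (Int → Int → PvCell) × (Int → Int → Int)) (i j r j'' : Int)
    (h : i < r ∨ r < 0) (hi : 0 ≤ i) :
    (pvMoveStep st i j).1 r j'' = st.1 r j'' ∧ (pvMoveStep st i j).2 r j'' = st.2 r j'' := by
  unfold pvMoveStep
  by_cases h1 : st.2 i j = 1
  · rw [if_pos h1]
    cases hf : (PySem.List.pyRange i (-1) (-1)).find? (fun k => st.2 k j == 0) with
    | none =>
        dsimp only
        exact ⟨pvUpd2_ne _ _ _ _ _ _ (fun hh => by omega), rfl⟩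
    | some k =>
        dsimp only
        have hk : -1 < k ∧ k ≤ i := by
          have := List.mem_of_find?_eq_some hf
          rwa [PySem.List.mem_pyRange_neg_one] at this
        refine ⟨?_, pvUpd2_ne _ _ _ _ _ _ (fun hh => by omega)⟩
        rw [pvUpd2_ne _ _ _ _ _ _ (fun hh => by omega),
          pvUpd2_ne _ _ _ _ _ _ (fun hh => by omega),
          pvUpd2_ne _ _ _ _ _ _ (fun hh => by omega)]
  · rw [if_neg h1]
    exact ⟨rfl, rfl⟩

lemma pvMoveStep_01 (st : (Int → Int → PvCell) × (Int → Int → Int)) (i j : Int)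
    (h : ∀ i' j', st.2 i' j' = 0 ∨ st.2 i' j' = 1) (i' j' : Int) :
    (pvMoveStep st i j).2 i' j' = 0 ∨ (pvMoveStep st i j).2 i' j' = 1 := by
  unfold pvMoveStep
  by_cases h1 : st.2 i j = 1
  · rw [if_pos h1]
    cases hf : (PySem.List.pyRange i (-1) (-1)).find? (fun k => st.2 k j == 0) with
    | none => dsimp only; exact h i' j'
    | some k =>
        dsimp only
        unfold pvUpd2
        split_ifs with hh
        · exact Or.inr rfl
        · exact h i' j'
  · rw [if_neg h1]
    exact h i' j'

lemma pvStepFold_not_mem (i : Int) (L : List Int) (st : (Int → Int → PvCell) × (Int → Int → Int))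
    (j : Int) (h : j ∉ L) (r : Int) :
    ((L.foldl (fun s j' => pvMoveStep s i j') st).1 r j = st.1 r j ∧
     (L.foldl (fun s j' => pvMoveStep s i j') st).2 r j = st.2 r j) := by
  induction L generalizing st with
  | nil => exact ⟨rfl, rfl⟩
  | cons a L ih =>
      have ha : j ≠ a := fun hh => h (hh ▸ List.mem_cons_self)
      have hL : j ∉ L := fun hh => h (List.mem_cons_of_mem _ hh)
      rw [List.foldl_cons]
      obtain ⟨e1, e2⟩ := ih (pvMoveStep st i a) hL
      obtain ⟨d1, d2⟩ := pvMoveStep_frame_col st i j a (fun hh => ha hh.symm) r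
      exact ⟨e1.trans d1, e2.trans d2⟩

lemma pvStepFold_mem (i : Int) (L : List Int) (st : (Int → Int → PvCell) × (Int → Int → Int))
    (j : Int) (hnd : L.Nodup) (h : j ∈ L) (r : Int) :
    ((L.foldl (fun s j' => pvMoveStep s i j') st).1 r j = (pvMoveStep st i j).1 r j ∧
     (L.foldl (fun s j' => pvMoveStep s i j') st).2 r j = (pvMoveStep st i j).2 r j) := by
  induction L generalizing st with
  | nil => cases h
  | cons a L ih =>
      rw [List.foldl_cons]
      rcases List.mem_cons.mp h with rfl | hL
      · have hjL : j ∉ L := (List.nodup_cons.mp hnd).1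
        exact pvStepFold_not_mem i L (pvMoveStep st i j) j hjL r
      · have ha : a ≠ j := by
          rintro rfl; exact (List.nodup_cons.mp hnd).1 hL
        obtain ⟨e1, e2⟩ := ih (pvMoveStep st i a) (List.nodup_cons.mp hnd).2 hL
        have hfr : ∀ r', (pvMoveStep st i a).1 r' j = st.1 r' j ∧
            (pvMoveStep st i a).2 r' j = st.2 r' j :=
          fun r' => pvMoveStep_frame_col st i j a ha r'
        obtain ⟨c1, c2⟩ := pvMoveStep_congr (pvMoveStep st i a) st i j
          (fun r' => (hfr r').1) (fun r' => (hfr r').2) r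
        exact ⟨e1.trans c1, e2.trans c2⟩

lemma pvNodup_pyRange_neg_one (a b : Int) : (PySem.List.pyRange a b (-1)).Nodup := by
  rw [PySem.List.pyRange_neg_one_eq_reverse]
  exact List.nodup_reverse.mpr (PySem.List.nodup_pyRange_one _ _)

lemma pvInner_col (n : Int) (st : (Int → Int → PvCell) × (Int → Int → Int)) (i j : Int)
    (h0 : 0 ≤ j) (hn : j < n) (r : Int) :
    (pvInner n st i).1 r j = (pvMoveStep st i j).1 r j ∧
    (pvInner n st i).2 r j = (pvMoveStep st i j).2 r j := by
  unfold pvInner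
  exact pvStepFold_mem i _ st j (pvNodup_pyRange_neg_one _ _)
    (by rw [PySem.List.mem_pyRange_neg_one]; omega) r

lemma pvInner_outcol (n : Int) (st : (Int → Int → PvCell) × (Int → Int → Int)) (i j : Int)
    (h : j < 0 ∨ n ≤ j) (r : Int) :
    (pvInner n st i).1 r j = st.1 r j ∧ (pvInner n st i).2 r j = st.2 r j := by
  unfold pvInner
  exact pvStepFold_not_mem i _ st j
    (by rw [PySem.List.mem_pyRange_neg_one]; omega) r

lemma pvInner_row (n : Int) (st : (Int → Int → PvCell) × (Int → Int → Int)) (i r : Int)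
    (h : i < r ∨ r < 0) (hi : 0 ≤ i) (j'' : Int) :
    (pvInner n st i).1 r j'' = st.1 r j'' ∧ (pvInner n st i).2 r j'' = st.2 r j'' := by
  unfold pvInner
  generalize (PySem.List.pyRange (n - 1) (-1) (-1)) = L
  induction L generalizing st with
  | nil => exact ⟨rfl, rfl⟩
  | cons a L ih =>
      rw [List.foldl_cons]
      obtain ⟨e1, e2⟩ := ih (pvMoveStep st i a)
      obtain ⟨d1, d2⟩ := pvMoveStep_frame_row st i a r j'' h hi
      exact ⟨e1.trans d1, e2.trans d2⟩

lemma pvInner_01 (n : Int) (st : (Int → Int → PvCell) × (Int → Int → Int)) (i : Int)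
    (h : ∀ i' j', st.2 i' j' = 0 ∨ st.2 i' j' = 1) (i' j' : Int) :
    (pvInner n st i).2 i' j' = 0 ∨ (pvInner n st i).2 i' j' = 1 := by
  unfold pvInner
  generalize (PySem.List.pyRange (n - 1) (-1) (-1)) = L
  induction L generalizing st with
  | nil => exact h i' j'
  | cons a L ih =>
      rw [List.foldl_cons]
      exact ih (pvMoveStep st i a) (fun i'' j'' => pvMoveStep_01 st i a h i'' j'')


lemma pvFindDesc (c : Nat) (q : Int → Bool) :
    (PySem.List.pyRange (c : Int) (-1) (-1)).find? q
      = (((List.range (c + 1)).filter (fun k : Nat => q (k : Int))).getLast?).map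
          (fun k : Nat => (k : Int)) := by
  induction c with
  | zero =>
      rw [show ((0:Nat):Int) = 0 from rfl,
        PySem.List.pyRange_neg_one_cons (by norm_num),
        PySem.List.pyRange_neg_one_eq_nil (by norm_num)]
      by_cases h : q 0
      · simp [List.find?, h]
      · simp [List.find?, h]
  | succ c ih =>
      have hcast : ((c + 1 : Nat) : Int) = (c : Int) + 1 := by push_cast; ring
      rw [hcast, PySem.List.pyRange_neg_one_cons (by omega),
        show (c:Int) + 1 - 1 = (c:Int) from by ring]
      rw [show List.range (c + 1 + 1) = List.range (c + 1) ++ [c + 1] from List.range_succ,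
        List.filter_append]
      by_cases h : q ((c:Int) + 1)
      · rw [List.find?_cons_of_pos h]
        have hfil : List.filter (fun k : Nat => q (k : Int)) [c + 1] = [c + 1] := by
          simp [hcast, h]
        rw [hfil, List.getLast?_concat, Option.map_some]
        exact congrArg some (by push_cast; ring)
      · rw [List.find?_cons_of_neg h]
        have hfil : List.filter (fun k : Nat => q (k : Int)) [c + 1] = [] := by
          simp [hcast, h]
        rw [hfil, List.append_nil, ih]

lemma pvDropLast_concat {α : Type} (l : List α) (x : α) (h : l.getLast? = some x) :
    l.dropLast ++ [x] = l := by
  induction l with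
  | nil => cases h
  | cons a l ih =>
      cases l with
      | nil => simp at h; simp [h]
      | cons b l' =>
          rw [List.getLast?_cons_cons] at h
          rw [List.dropLast_cons₂, List.cons_append, ih h]

lemma pvFilter_ne_last (l : List Nat) (x : Nat) (hnd : l.Nodup) (hl : l.getLast? = some x) :
    l.filter (fun y => !(y == x)) = l.dropLast := by
  induction l with
  | nil => cases hl
  | cons a l ih =>
      cases l with
      | nil =>
          simp at hl
          subst hl
          simp
      | cons b l' =>
          rw [List.getLast?_cons_cons] at hl
          have hx : x ∈ b :: l' := List.mem_of_getLast? hl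
          have ha : a ≠ x := by
            rintro rfl
            exact (List.nodup_cons.mp hnd).1 hx
          rw [List.dropLast_cons₂]
          rw [List.filter_cons_of_pos (by simp [ha])]
          rw [ih (List.nodup_cons.mp hnd).2 hl]

lemma pvSurv_congr (f f' : Int → Int → PvCell) (a a' : Int → Int → Int) (c : Nat) (j : Int)
    (h : ∀ k : Nat, k < c → (f (k : Int) j = f' (k : Int) j ∧ a (k : Int) j = a' (k : Int) j)) :
    pvSurv f a c j = pvSurv f' a' c j := by
  unfold pvSurv
  rw [List.filter_congr (fun k hk => by
    rw [(h k (List.mem_range.mp hk)).2])]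
  refine List.map_congr_left (fun k hk => ?_)
  have := List.mem_range.mp (List.mem_of_mem_filter hk)
  exact (h k this).1

lemma pvRun_zero (n : Int) (st : (Int → Int → PvCell) × (Int → Int → Int)) :
    pvRun n 0 st = st := by
  unfold pvRun
  rw [show ((0:Nat):Int) - 1 = -1 from rfl, PySem.List.pyRange_neg_one_eq_nil (by norm_num)]
  rfl

lemma pvRun_succ (n : Int) (c : Nat) (st : (Int → Int → PvCell) × (Int → Int → Int)) :
    pvRun n (c + 1) st = pvRun n c (pvInner n st (c : Int)) := by
  unfold pvRun
  rw [show ((c + 1 : Nat) : Int) - 1 = (c : Int) from by push_cast; ring,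
    PySem.List.pyRange_neg_one_cons (by omega), List.foldl_cons]

lemma pvRun_outcol (n : Int) (c : Nat) (st : (Int → Int → PvCell) × (Int → Int → Int))
    (j : Int) (h : j < 0 ∨ n ≤ j) (r : Int) :
    (pvRun n c st).1 r j = st.1 r j ∧ (pvRun n c st).2 r j = st.2 r j := by
  induction c generalizing st with
  | zero => rw [pvRun_zero]; exact ⟨rfl, rfl⟩
  | succ c ih =>
      rw [pvRun_succ]
      obtain ⟨e1, e2⟩ := ih (pvInner n st (c : Int))
      obtain ⟨d1, d2⟩ := pvInner_outcol n st (c : Int) j h r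
      exact ⟨e1.trans d1, e2.trans d2⟩

lemma pvRun_spec (n : Int) (c : Nat) (f : Int → Int → PvCell) (a : Int → Int → Int)
    (h01 : ∀ i' j', a i' j' = 0 ∨ a i' j' = 1) (j : Int) (hj0 : 0 ≤ j) (hjn : j < n) :
    (∀ r : Int, ((c : Int) ≤ r ∨ r < 0) →
        (pvRun n c (f, a)).1 r j = f r j ∧ (pvRun n c (f, a)).2 r j = a r j) ∧
    ((List.range c).map (fun k : Nat => (pvRun n c (f, a)).1 (k : Int) j)
      = List.replicate (c - (pvSurv f a c j).length) none ++ pvSurv f a c j) := by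
  induction c generalizing f a with
  | zero =>
      rw [pvRun_zero]
      exact ⟨fun r _ => ⟨rfl, rfl⟩, by simp [pvSurv]⟩
  | succ c ih =>
      have hrun : pvRun n (c + 1) (f, a) = pvRun n c ((pvInner n (f, a) (c : Int)).1,
          (pvInner n (f, a) (c : Int)).2) := by
        rw [pvRun_succ]
      set st1 := pvInner n (f, a) (c : Int) with hst1
      have hcol : ∀ r, st1.1 r j = (pvMoveStep (f, a) (c : Int) j).1 r j ∧
          st1.2 r j = (pvMoveStep (f, a) (c : Int) j).2 r j :=
        fun r => pvInner_col n (f, a) (c : Int) j hj0 hjn r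
      have hrowfr : ∀ r : Int, ((c : Int) < r ∨ r < 0) → ∀ j'',
          st1.1 r j'' = f r j'' ∧ st1.2 r j'' = a r j'' :=
        fun r hr j'' => pvInner_row n (f, a) (c : Int) r hr (by positivity) j''
      have h01' : ∀ i' j', st1.2 i' j' = 0 ∨ st1.2 i' j' = 1 :=
        fun i' j' => pvInner_01 n (f, a) (c : Int) h01 i' j'
      obtain ⟨ihA, ihB⟩ := ih st1.1 st1.2 h01'
      have hA : ∀ r : Int, (((c : Nat) + 1 : Int) ≤ r ∨ r < 0) →
          (pvRun n (c + 1) (f, a)).1 r j = f r j ∧ (pvRun n (c + 1) (f, a)).2 r j = a r j := by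
        intro r hr
        rw [hrun]
        have hr' : ((c : Int) ≤ r ∨ r < 0) := by
          rcases hr with h | h
          exacts [Or.inl (by omega), Or.inr h]
        obtain ⟨e1, e2⟩ := ihA r hr'
        obtain ⟨d1, d2⟩ := hrowfr r (by rcases hr with h | h; exacts [Or.inl (by omega), Or.inr h]) j
        exact ⟨e1.trans d1, e2.trans d2⟩
      refine ⟨by exact_mod_cast hA, ?_⟩
      have hlast : (pvRun n (c + 1) (f, a)).1 ((c : Nat) : Int) j
          = (pvMoveStep (f, a) (c : Int) j).1 (c : Int) j := by
        rw [hrun]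
        exact ((ihA (c : Int) (Or.inl le_rfl)).1).trans (hcol (c : Int)).1
      have hbelow : (List.range c).map (fun k : Nat => (pvRun n (c + 1) (f, a)).1 (k : Int) j)
          = List.replicate (c - (pvSurv st1.1 st1.2 c j).length) none ++ pvSurv st1.1 st1.2 c j := by
        rw [hrun]; exact ihB
      rw [List.range_succ, List.map_append, hbelow, List.map_singleton, hlast]
      rcases h01 (c : Int) j with ha | ha
      · -- row c not marked: the step is the identity
        have hstep : pvMoveStep (f, a) (c : Int) j = (f, a) := by
          unfold pvMoveStep
          rw [if_neg (by dsimp only; omega)]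
        have hcol' : ∀ k : Nat, k < c →
            (st1.1 (k : Int) j = f (k : Int) j ∧ st1.2 (k : Int) j = a (k : Int) j) := by
          intro k _
          obtain ⟨e1, e2⟩ := hcol (k : Int)
          rw [hstep] at e1 e2
          exact ⟨e1, e2⟩
        rw [pvSurv_congr st1.1 f st1.2 a c j hcol', hstep]
        have hsO : pvSurv f a (c + 1) j = pvSurv f a c j ++ [f (c : Int) j] := by
          unfold pvSurv
          rw [List.range_succ, List.filter_append, List.map_append]
          congr 1
          simp [ha]
        rw [hsO]
        rw [List.length_append, List.length_singleton]
        rw [show c + 1 - ((pvSurv f a c j).length + 1) = c - (pvSurv f a c j).length from by omega]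
        rw [List.append_assoc]
      · -- row c marked: it is emptied and pulls the lowest unconsumed survivor above
        have hq : (fun k => (f, a).2 k j == 0) = (fun k => a k j == 0) := rfl
        have hfd := pvFindDesc c (fun k => a k j == 0)
        have hfc : (List.range (c + 1)).filter (fun k : Nat => a (k : Int) j == 0)
            = (List.range c).filter (fun k : Nat => a (k : Int) j == 0) := by
          rw [List.range_succ, List.filter_append]
          have : List.filter (fun k : Nat => a (k : Int) j == 0) [c] = [] := by
            simp [ha]
          rw [this, List.append_nil]
        set Lf := (List.range c).filter (fun k : Nat => a (k : Int) j == 0) with hLfdef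
        have hsO : pvSurv f a (c + 1) j = Lf.map (fun k : Nat => f (k : Int) j) := by
          unfold pvSurv
          rw [hfc]
        have hsOc : pvSurv f a c j = Lf.map (fun k : Nat => f (k : Int) j) := rfl
        cases hgl : Lf.getLast? with
        | none =>
            have hLf0 : Lf = [] := List.getLast?_eq_none_iff.mp hgl
            have hfind : (PySem.List.pyRange (c : Int) (-1) (-1)).find?
                (fun k => a k j == 0) = none := by
              rw [hfd]; beta_reduce; rw [hfc, hLf0]; rfl
            have hstep : pvMoveStep (f, a) (c : Int) j = (pvUpd2 f (c : Int) j none, a) := by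
              unfold pvMoveStep
              rw [if_pos (by dsimp only; omega)]
              dsimp only
              rw [hfind]
            have hcol' : ∀ k : Nat, k < c →
                (st1.1 (k : Int) j = f (k : Int) j ∧ st1.2 (k : Int) j = a (k : Int) j) := by
              intro k hk
              obtain ⟨e1, e2⟩ := hcol (k : Int)
              rw [hstep] at e1 e2
              dsimp only at e1 e2
              refine ⟨e1.trans ?_, e2⟩
              exact pvUpd2_ne _ _ _ _ _ _ (by intro hh; omega)
            have hlastv : (pvMoveStep (f, a) (c : Int) j).1 (c : Int) j = none := by
              rw [hstep]; dsimp only; exact pvUpd2_same _ _ _ _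
            rw [pvSurv_congr st1.1 f st1.2 a c j hcol', hlastv, hsO, hsOc, hLf0]
            simp [List.replicate_succ']
        | some kstar =>
            have hkmem : kstar ∈ Lf := List.mem_of_getLast? hgl
            have hkc : kstar < c := List.mem_range.mp (List.mem_of_mem_filter hkmem)
            have hka : a (kstar : Int) j = 0 := by
              have := List.of_mem_filter hkmem
              simpa using this
            have hfind : (PySem.List.pyRange (c : Int) (-1) (-1)).find?
                (fun k => a k j == 0) = some ((kstar : Nat) : Int) := by
              rw [hfd]; beta_reduce; rw [hfc, hgl]; rfl
            have hstep : pvMoveStep (f, a) (c : Int) j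
                = (pvUpd2 (pvUpd2 (pvUpd2 f (c : Int) j none) (c : Int) j
                    ((pvUpd2 f (c : Int) j none) (kstar : Int) j)) (kstar : Int) j none,
                   pvUpd2 a (kstar : Int) j 1) := by
              unfold pvMoveStep
              rw [if_pos (by dsimp only; omega)]
              dsimp only
              rw [hfind]
            have hf1k : (pvUpd2 f (c : Int) j none) (kstar : Int) j = f (kstar : Int) j :=
              pvUpd2_ne _ _ _ _ _ _ (by intro hh; omega)
            have hst1v : ∀ k : Nat, k < c →
                (st1.1 (k : Int) j = (if k = kstar then none else f (k : Int) j) ∧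
                 st1.2 (k : Int) j = (if k = kstar then 1 else a (k : Int) j)) := by
              intro k hk
              obtain ⟨e1, e2⟩ := hcol (k : Int)
              rw [hstep] at e1 e2
              dsimp only at e1 e2
              by_cases hkk : k = kstar
              · subst hkk
                refine ⟨e1.trans ?_, e2.trans ?_⟩
                · rw [if_pos rfl]; exact pvUpd2_same _ _ _ _
                · rw [if_pos rfl]; exact pvUpd2_same _ _ _ _
              · have hne : ¬((k : Int) = (kstar : Int) ∧ j = j) := by
                  intro hh; exact hkk (by exact_mod_cast hh.1)
                refine ⟨e1.trans ?_, e2.trans ?_⟩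
                · rw [if_neg hkk]
                  rw [pvUpd2_ne _ _ _ _ _ _ hne]
                  rw [pvUpd2_ne _ _ _ _ _ _ (by intro hh; omega)]
                  exact pvUpd2_ne _ _ _ _ _ _ (by intro hh; omega)
                · rw [if_neg hkk]
                  exact pvUpd2_ne _ _ _ _ _ _ hne
            have hlastv : (pvMoveStep (f, a) (c : Int) j).1 (c : Int) j = f (kstar : Int) j := by
              rw [hstep]
              dsimp only
              rw [pvUpd2_ne _ _ _ _ _ _ (by intro hh; omega), pvUpd2_same, hf1k]
            -- survivors after the step = survivors without kstar = dropLast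
            have hLnd : Lf.Nodup := List.Nodup.filter _ (List.nodup_range)
            have hsI : pvSurv st1.1 st1.2 c j
                = (Lf.dropLast).map (fun k : Nat => f (k : Int) j) := by
              unfold pvSurv
              have hfe : (List.range c).filter (fun k : Nat => st1.2 (k : Int) j == 0)
                  = Lf.filter (fun k => !(k == kstar)) := by
                rw [hLfdef, List.filter_filter]
                refine List.filter_congr (fun k hk => ?_)
                have hk' := List.mem_range.mp hk
                by_cases hkk : k = kstar
                · subst hkk
                  rw [(hst1v k hk').2, if_pos rfl]
                  simp
                · rw [(hst1v k hk').2, if_neg hkk]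
                  simp [hkk]
              rw [hfe, pvFilter_ne_last Lf kstar hLnd hgl]
              refine List.map_congr_left (fun k hk => ?_)
              have hkLf : k ∈ Lf.filter (fun y => !(y == kstar)) := by
                rw [pvFilter_ne_last Lf kstar hLnd hgl]; exact hk
              have hkne : k ≠ kstar := by simpa using (List.of_mem_filter hkLf)
              have hkc' : k < c := List.mem_range.mp (List.mem_of_mem_filter (List.mem_of_mem_filter hkLf))
              rw [(hst1v k hkc').1, if_neg hkne]
            rw [hsI, hlastv, hsO]
            have hne : Lf ≠ [] := List.ne_nil_of_mem hkmem
            have hlen1 : 1 ≤ Lf.length := by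
              cases hLfe : Lf with
              | nil => exact absurd hLfe hne
              | cons x l => simp [hLfe]
            have hlenc : Lf.length ≤ c := by
              rw [hLfdef]
              calc ((List.range c).filter _).length ≤ (List.range c).length := List.length_filter_le _ _
                _ = c := List.length_range
            rw [List.length_map, List.length_map, List.length_dropLast]
            rw [show c - (Lf.length - 1) = c + 1 - Lf.length from by omega]
            rw [List.append_assoc]
            congr 1
            rw [List.map_dropLast]
            have hglm : (Lf.map (fun k : Nat => f (k : Int) j)).getLast? = some (f (kstar : Int) j) := by
              rw [List.getLast?_map, hgl]; rfl
            exact pvDropLast_concat _ _ hglm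


-- ---- B-side: membership in the removed-set ----

def pvBB (m : Int) (cols : List (List PvCell)) (bi bj : Nat) : Prop :=
  bj < cols.length - 1 ∧ bi < (m - 1).toNat ∧
  ((cols.getD bj []).getD bi none ≠ none ∧
   (cols.getD bj []).getD bi none = (cols.getD bj []).getD (bi + 1) none ∧
   (cols.getD bj []).getD bi none = (cols.getD (bj + 1) []).getD bi none ∧
   (cols.getD bj []).getD bi none = (cols.getD (bj + 1) []).getD (bi + 1) none)

def pvFour (bi bj : Nat) : List (Int × Int) :=
  [((bi : Int), (bj : Int)), ((bi : Int) + 1, (bj : Int)),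
   ((bi : Int), (bj : Int) + 1), ((bi : Int) + 1, (bj : Int) + 1)]

lemma pvBlocksInner_mem (m : Int) (cols : List (List PvCell)) (j : Nat) (b : Nat)
    (r : PySem.Set (Int × Int)) (p : Int × Int) :
    (p ∈ (List.range b).foldl (fun r (i : Nat) =>
      let cj := cols.getD j []
      let cj1 := cols.getD (j + 1) []
      let v := cj.getD i none
      if v ≠ none ∧ v = cj.getD (i + 1) none ∧ v = cj1.getD i none ∧ v = cj1.getD (i + 1) none then
        PySem.Set.update r [((i : Int), (j : Int)), ((i : Int) + 1, (j : Int)),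
                            ((i : Int), (j : Int) + 1), ((i : Int) + 1, (j : Int) + 1)]
      else r) r) ↔
    (p ∈ r ∨ ∃ bi : Nat, bi < b ∧
      (((cols.getD j []).getD bi none ≠ none ∧
        (cols.getD j []).getD bi none = (cols.getD j []).getD (bi + 1) none ∧
        (cols.getD j []).getD bi none = (cols.getD (j + 1) []).getD bi none ∧
        (cols.getD j []).getD bi none = (cols.getD (j + 1) []).getD (bi + 1) none)) ∧
      p ∈ pvFour bi j) := by
  induction b generalizing r with
  | zero => simp
  | succ b ih =>
      rw [List.range_succ, List.foldl_append, List.foldl_cons, List.foldl_nil]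
      by_cases hc : ((cols.getD j []).getD b none ≠ none ∧
          (cols.getD j []).getD b none = (cols.getD j []).getD (b + 1) none ∧
          (cols.getD j []).getD b none = (cols.getD (j + 1) []).getD b none ∧
          (cols.getD j []).getD b none = (cols.getD (j + 1) []).getD (b + 1) none)
      · rw [if_pos hc, PySem.Set.mem_update, ih]
        constructor
        · rintro ((h | ⟨bi, hbi, hcond, hmem⟩) | h)
          · exact Or.inl h
          · exact Or.inr ⟨bi, by omega, hcond, hmem⟩
          · exact Or.inr ⟨b, by omega, hc, h⟩
        · rintro (h | ⟨bi, hbi, hcond, hmem⟩)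
          · exact Or.inl (Or.inl h)
          · rcases Nat.lt_succ_iff_lt_or_eq.mp hbi with h' | rfl
            · exact Or.inl (Or.inr ⟨bi, h', hcond, hmem⟩)
            · exact Or.inr hmem
      · rw [if_neg hc, ih]
        constructor
        · rintro (h | ⟨bi, hbi, hcond, hmem⟩)
          · exact Or.inl h
          · exact Or.inr ⟨bi, by omega, hcond, hmem⟩
        · rintro (h | ⟨bi, hbi, hcond, hmem⟩)
          · exact Or.inl h
          · rcases Nat.lt_succ_iff_lt_or_eq.mp hbi with h' | rfl
            · exact Or.inr ⟨bi, h', hcond, hmem⟩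
            · exact absurd hcond hc
  
lemma pvBlocks_mem (m : Int) (cols : List (List PvCell)) (p : Int × Int) :
    p ∈ pvBlocks m cols ↔ ∃ bi bj : Nat, pvBB m cols bi bj ∧ p ∈ pvFour bi bj := by
  unfold pvBlocks
  have main : ∀ (b : Nat) (r : PySem.Set (Int × Int)),
      (p ∈ (List.range b).foldl (fun r (j : Nat) =>
        (List.range (m - 1).toNat).foldl (fun r (i : Nat) =>
          let cj := cols.getD j []
          let cj1 := cols.getD (j + 1) []
          let v := cj.getD i none
          if v ≠ none ∧ v = cj.getD (i + 1) none ∧ v = cj1.getD i none ∧ v = cj1.getD (i + 1) none then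
            PySem.Set.update r [((i : Int), (j : Int)), ((i : Int) + 1, (j : Int)),
                                ((i : Int), (j : Int) + 1), ((i : Int) + 1, (j : Int) + 1)]
          else r) r) r) ↔
      (p ∈ r ∨ ∃ bi bj : Nat, bj < b ∧ bi < (m - 1).toNat ∧
        (((cols.getD bj []).getD bi none ≠ none ∧
          (cols.getD bj []).getD bi none = (cols.getD bj []).getD (bi + 1) none ∧
          (cols.getD bj []).getD bi none = (cols.getD (bj + 1) []).getD bi none ∧
          (cols.getD bj []).getD bi none = (cols.getD (bj + 1) []).getD (bi + 1) none)) ∧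
        p ∈ pvFour bi bj) := by
    intro b
    induction b with
    | zero => simp
    | succ b ihb =>
        intro r
        rw [List.range_succ, List.foldl_append, List.foldl_cons, List.foldl_nil]
        rw [pvBlocksInner_mem m cols b (m - 1).toNat _ p, ihb r]
        constructor
        · rintro ((h | ⟨bi, bj, hbj, hbi, hcond, hmem⟩) | ⟨bi, hbi, hcond, hmem⟩)
          · exact Or.inl h
          · exact Or.inr ⟨bi, bj, by omega, hbi, hcond, hmem⟩
          · exact Or.inr ⟨bi, b, by omega, hbi, hcond, hmem⟩
        · rintro (h | ⟨bi, bj, hbj, hbi, hcond, hmem⟩)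
          · exact Or.inl (Or.inl h)
          · rcases Nat.lt_succ_iff_lt_or_eq.mp hbj with h' | rfl
            · exact Or.inl (Or.inr ⟨bi, bj, h', hbi, hcond, hmem⟩)
            · exact Or.inr ⟨bi, hbi, hcond, hmem⟩
  rw [main (cols.length - 1) PySem.Set.empty]
  unfold pvBB
  constructor
  · rintro (h | ⟨bi, bj, hbj, hbi, hcond, hmem⟩)
    · cases h
    · exact ⟨bi, bj, ⟨hbj, hbi, hcond⟩, hmem⟩
  · rintro ⟨bi, bj, ⟨hbj, hbi, hcond⟩, hmem⟩
    exact Or.inr ⟨bi, bj, hbj, hbi, hcond, hmem⟩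


-- ---- bridging the two representations ----

lemma pvBB_iff_base (m n : Int) (board : List String) (f : Int → Int → PvCell)
    (cols : List (List PvCell)) (hRel : pvRel m n board f cols) (hm : 0 < m) (hn : 0 < n)
    (bi bj : Nat) :
    pvBB m cols bi bj ↔ pvBase m n f (bi : Int) (bj : Int) := by
  obtain ⟨hlen, hcl, hreg, hout⟩ := hRel
  unfold pvBB pvBase
  constructor
  · rintro ⟨hbj, hbi, hne, e1, e2, e3⟩
    have hbj' : (bj : Int) + 1 < n := by omega
    have hbi' : (bi : Int) + 1 < m := by omega
    have hc00 : f (bi : Int) (bj : Int) = (cols.getD bj []).getD bi none := by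
      have := hreg (bi : Int) (bj : Int) ⟨by positivity, by omega, by positivity, by omega⟩
      simpa using this
    have hc10 : f ((bi : Int) + 1) (bj : Int) = (cols.getD bj []).getD (bi + 1) none := by
      have := hreg ((bi : Int) + 1) (bj : Int) ⟨by positivity, by omega, by positivity, by omega⟩
      rw [this]
      norm_num
    have hc01 : f (bi : Int) ((bj : Int) + 1) = (cols.getD (bj + 1) []).getD bi none := by
      have := hreg (bi : Int) ((bj : Int) + 1) ⟨by positivity, by omega, by positivity, by omega⟩
      rw [this]
      norm_num
    have hc11 : f ((bi : Int) + 1) ((bj : Int) + 1) = (cols.getD (bj + 1) []).getD (bi + 1) none := by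
      have := hreg ((bi : Int) + 1) ((bj : Int) + 1) ⟨by positivity, by omega, by positivity, by omega⟩
      rw [this]
      norm_num
    refine ⟨hbi', hbj', by rw [hc00]; exact hne, ?_, ?_, ?_⟩
    · rw [hc10, hc00, e1]
    · rw [hc01, hc00, e2]
    · rw [hc11, hc00, e3]
  · rintro ⟨hbi', hbj', hne, e1, e2, e3⟩
    have hc00 : f (bi : Int) (bj : Int) = (cols.getD bj []).getD bi none := by
      have := hreg (bi : Int) (bj : Int) ⟨by positivity, by omega, by positivity, by omega⟩
      simpa using this
    have hc10 : f ((bi : Int) + 1) (bj : Int) = (cols.getD bj []).getD (bi + 1) none := by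
      have := hreg ((bi : Int) + 1) (bj : Int) ⟨by positivity, by omega, by positivity, by omega⟩
      rw [this]
      norm_num
    have hc01 : f (bi : Int) ((bj : Int) + 1) = (cols.getD (bj + 1) []).getD bi none := by
      have := hreg (bi : Int) ((bj : Int) + 1) ⟨by positivity, by omega, by positivity, by omega⟩
      rw [this]
      norm_num
    have hc11 : f ((bi : Int) + 1) ((bj : Int) + 1) = (cols.getD (bj + 1) []).getD (bi + 1) none := by
      have := hreg ((bi : Int) + 1) ((bj : Int) + 1) ⟨by positivity, by omega, by positivity, by omega⟩
      rw [this]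
      norm_num
    refine ⟨by omega, by omega, by rw [← hc00]; exact hne, ?_, ?_, ?_⟩
    · rw [← hc10, ← hc00, e1]
    · rw [← hc01, ← hc00, e2]
    · rw [← hc11, ← hc00, e3]

lemma pvMem_iff_mark (m n : Int) (board : List String) (f : Int → Int → PvCell)
    (cols : List (List PvCell)) (hRel : pvRel m n board f cols) (hm : 0 < m) (hn : 0 < n)
    (p : Int × Int) :
    p ∈ pvBlocks m cols ↔ pvMark m n f p.1 p.2 := by
  rw [pvBlocks_mem]
  unfold pvMark
  constructor
  · rintro ⟨bi, bj, hbb, hmem⟩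
    have hb := (pvBB_iff_base m n board f cols hRel hm hn bi bj).mp hbb
    simp only [pvFour, List.mem_cons, List.not_mem_nil, or_false] at hmem
    rcases hmem with rfl | rfl | rfl | rfl
    · exact ⟨(bi : Int), (bj : Int), by positivity, by positivity, hb, Or.inl rfl, Or.inl rfl⟩
    · exact ⟨(bi : Int), (bj : Int), by positivity, by positivity, hb, Or.inr rfl, Or.inl rfl⟩
    · exact ⟨(bi : Int), (bj : Int), by positivity, by positivity, hb, Or.inl rfl, Or.inr rfl⟩
    · exact ⟨(bi : Int), (bj : Int), by positivity, by positivity, hb, Or.inr rfl, Or.inr rfl⟩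
  · rintro ⟨bi, bj, hbi0, hbj0, hb, hc1, hc2⟩
    have hbi' : ((bi.toNat : Nat) : Int) = bi := Int.toNat_of_nonneg hbi0
    have hbj' : ((bj.toNat : Nat) : Int) = bj := Int.toNat_of_nonneg hbj0
    refine ⟨bi.toNat, bj.toNat,
      (pvBB_iff_base m n board f cols hRel hm hn bi.toNat bj.toNat).mpr
        (by rw [hbi', hbj']; exact hb), ?_⟩
    rcases hc1 with h1 | h1 <;> rcases hc2 with h2 | h2 <;>
      simp [pvFour, Prod.ext_iff, hbi', hbj', h1, h2]

lemma pvEmpty_iff (m n : Int) (board : List String) (f : Int → Int → PvCell)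
    (cols : List (List PvCell)) (hRel : pvRel m n board f cols) (hm : 0 < m) (hn : 0 < n) :
    (pvBlocks m cols = []) ↔ ¬ ∃ bi bj : Int, 0 ≤ bi ∧ 0 ≤ bj ∧ pvBase m n f bi bj := by
  rw [List.eq_nil_iff_forall_not_mem]
  constructor
  · rintro h ⟨bi, bj, hbi0, hbj0, hb⟩
    exact h (bi, bj) ((pvMem_iff_mark m n board f cols hRel hm hn (bi, bj)).mpr
      ⟨bi, bj, hbi0, hbj0, hb, Or.inl rfl, Or.inl rfl⟩)
  · intro h p hp
    obtain ⟨bi, bj, hbi0, hbj0, hb, _, _⟩ :=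
      (pvMem_iff_mark m n board f cols hRel hm hn p).mp hp
    exact h ⟨bi, bj, hbi0, hbj0, hb⟩

lemma pvMove_eq_run (m n : Int) (st : (Int → Int → PvCell) × (Int → Int → Int)) (hm0 : 0 ≤ m) :
    pvMove m n st = pvRun n m.toNat st := by
  unfold pvMove pvRun pvInner
  rw [Int.toNat_of_nonneg hm0]

lemma pvRebuild_rel (m n : Int) (board : List String) (f : Int → Int → PvCell)
    (cols : List (List PvCell)) (hRel : pvRel m n board f cols) (hm : 0 < m) (hn : 0 < n)
    (a : Int → Int → Int) (ha01 : ∀ i j, a i j = 0 ∨ a i j = 1)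
    (haM : ∀ i j, a i j = 1 ↔ pvMark m n f i j) :
    pvRel m n board (pvMove m n (f, a)).1 (pvRebuild m cols (pvBlocks m cols)) := by
  obtain ⟨hlen, hcl, hreg, hout⟩ := hRel
  have hmv : pvMove m n (f, a) = pvRun n m.toNat (f, a) := pvMove_eq_run m n (f, a) (by omega)
  -- survivors of column j agree with pvSurv
  have hsurv : ∀ j : Nat, j < n.toNat →
      ((List.range m.toNat).filter
        (fun i : Nat => !(PySem.Set.contains (pvBlocks m cols) ((i : Int), (j : Int))))).map
          (fun i : Nat => (cols.getD j []).getD i none)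
      = pvSurv f a m.toNat (j : Int) := by
    intro j hj
    unfold pvSurv
    rw [List.filter_congr (fun i hi => ?_)]
    · refine List.map_congr_left (fun i hi => ?_)
      have hi' : i < m.toNat := List.mem_range.mp (List.mem_of_mem_filter hi)
      have := hreg (i : Int) (j : Int) ⟨by positivity, by omega, by positivity, by omega⟩
      rw [this]
      norm_num
    · have hmem := pvMem_iff_mark m n board f cols ⟨hlen, hcl, hreg, hout⟩ hm hn
        ((i : Int), (j : Int))
      rcases ha01 (i : Int) (j : Int) with h0 | h1
      · have : ¬ pvMark m n f (i : Int) (j : Int) := fun hmk => by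
          have := (haM (i : Int) (j : Int)).mpr hmk
          omega
        have hnc : ¬ ((i : Int), (j : Int)) ∈ pvBlocks m cols := fun hc => this (hmem.mp hc)
        simp [PySem.Set.contains_iff, hnc, h0]
      · have hmk : pvMark m n f (i : Int) (j : Int) := (haM _ _).mp h1
        have hc : ((i : Int), (j : Int)) ∈ pvBlocks m cols := hmem.mpr hmk
        simp [PySem.Set.contains_iff, hc, h1]
  -- the rebuilt column j
  have hcolB : ∀ j : Nat, j < n.toNat →
      (pvRebuild m cols (pvBlocks m cols)).getD j []
        = List.replicate (m.toNat - (pvSurv f a m.toNat (j : Int)).length) none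
            ++ pvSurv f a m.toNat (j : Int) := by
    intro j hj
    unfold pvRebuild
    rw [List.getD_eq_getElem?_getD, List.getElem?_map, PySem.List.getElem?_enumerate,
      List.getElem?_eq_getElem (by omega : j < cols.length)]
    simp only [Option.map_some, Option.getD_some, zero_add]
    have hcj : cols[j] = cols.getD j [] := by
      rw [List.getD_eq_getElem?_getD, List.getElem?_eq_getElem (by omega : j < cols.length)]
      rfl
    rw [hcj, hsurv j hj]
  have hrunspec := fun (j : Nat) (hj : j < n.toNat) =>
    pvRun_spec n m.toNat f a ha01 (j : Int) (by positivity) (by omega)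
  refine ⟨?_, ?_, ?_, ?_⟩
  · unfold pvRebuild
    rw [List.length_map, PySem.List.length_enumerate, hlen]
  · intro col hcol
    unfold pvRebuild at hcol
    rw [List.mem_map] at hcol
    obtain ⟨p, hpmem, rfl⟩ := hcol
    rw [List.length_append, List.length_replicate, List.length_map]
    have hle : (((List.range m.toNat).filter
        (fun i : Nat => !(PySem.Set.contains (pvBlocks m cols) ((i : Int), p.1)))).length ≤ m.toNat) := by
      calc _ ≤ (List.range m.toNat).length := List.length_filter_le _ _
        _ = m.toNat := List.length_range
    omega
  · intro i j hregion
    obtain ⟨hi0, him, hj0, hjn⟩ := hregion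
    have hjN : j.toNat < n.toNat := by omega
    have hiN : i.toNat < m.toNat := by omega
    have hji : ((j.toNat : Nat) : Int) = j := Int.toNat_of_nonneg hj0
    have hii : ((i.toNat : Nat) : Int) = i := Int.toNat_of_nonneg hi0
    rw [hcolB j.toNat hjN, hmv]
    obtain ⟨hfr, hmap⟩ := hrunspec j.toNat hjN
    rw [hji] at hmap
    -- read entry i.toNat of both sides of hmap
    have hthis := congrArg (fun l => l.getD i.toNat none) hmap
    simp only at hthis
    have hg : ((List.range m.toNat).map
        (fun k : Nat => (pvRun n m.toNat (f, a)).1 (k : Int) j)).getD i.toNat none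
        = (pvRun n m.toNat (f, a)).1 ((i.toNat : Nat) : Int) j := by
      rw [List.getD_eq_getElem?_getD, List.getElem?_map, List.getElem?_range hiN]
      rfl
    rw [hg, hii] at hthis
    rw [hji]
    exact hthis
  · intro i j hnreg
    rw [hmv]
    by_cases hj : 0 ≤ j ∧ j < n
    · have hr : ((m.toNat : Nat) : Int) ≤ i ∨ i < 0 := by
        by_cases hi0 : 0 ≤ i
        · by_cases him : i < m
          · exact absurd ⟨hi0, him, hj.1, hj.2⟩ hnreg
          · left; omega
        · right; omega
      obtain ⟨hfr, _⟩ := pvRun_spec n m.toNat f a ha01 j hj.1 hj.2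
      rw [(hfr i hr).1]
      exact hout i j hnreg
    · obtain ⟨e1, _⟩ := pvRun_outcol n m.toNat (f, a) j (by omega) i
      rw [e1]
      exact hout i j hnreg


-- ---- one round, the loop, and the final count ----

lemma pvRound (m n : Int) (board : List String) (f : Int → Int → PvCell)
    (cols : List (List PvCell)) (hm : 0 < m) (hn : 0 < n)
    (hRel : pvRel m n board f cols) :
    ((pvCheck m n f).1 = true ↔ pvBlocks m cols ≠ []) ∧
    ((pvCheck m n f).1 = true →
      pvRel m n board (pvCheck m n f).2 (pvRebuild m cols (pvBlocks m cols))) ∧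
    ((pvCheck m n f).1 = false → (pvCheck m n f).2 = f) := by
  obtain ⟨c1, c2, c3⟩ := pvCheck_spec m n f
  have hemp := pvEmpty_iff m n board f cols hRel hm hn
  refine ⟨?_, ?_, c2⟩
  · rw [c1]
    constructor
    · intro h hnil
      exact (hemp.mp hnil) h
    · intro hne
      exact not_not.mp (fun hno => hne (hemp.mpr hno))
  · intro ht
    obtain ⟨a, ha01, haM, heq⟩ := c3 ht
    rw [heq]
    exact pvRebuild_rel m n board f cols hRel hm hn a ha01 haM

lemma pvLoop_rel (m n : Int) (board : List String) (hm : 0 < m) (hn : 0 < n) :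
    ∀ (fu : Nat) (f : Int → Int → PvCell) (cols : List (List PvCell)),
      pvRel m n board f cols →
      pvRel m n board (pvLoopA fu m n f) (pvLoopB fu m cols) := by
  intro fu
  induction fu with
  | zero => intro f cols h; exact h
  | succ fu ih =>
      intro f cols hRel
      obtain ⟨r1, r2, r3⟩ := pvRound m n board f cols hm hn hRel
      by_cases hf : (pvCheck m n f).1 = true
      · have hbne : pvBlocks m cols ≠ [] := r1.mp hf
        simp only [pvLoopA, pvLoopB, hf, if_true, if_neg hbne]
        exact ih _ _ (r2 hf)
      · have hf' : (pvCheck m n f).1 = false := Bool.eq_false_iff.mpr hf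
        have hbe : pvBlocks m cols = [] := by
          by_contra hne
          exact hf (r1.mpr hne)
        simp only [pvLoopA, pvLoopB, hf', Bool.false_eq_true, if_false, if_pos hbe]
        rw [r3 hf']
        exact hRel

lemma pvSumMapRange (N : Nat) (g : Nat → Nat) :
    ((List.range N).map g).sum = ∑ i ∈ Finset.range N, g i := by
  induction N with
  | zero => simp
  | succ N ih =>
      rw [List.range_succ, List.map_append, List.sum_append, Finset.sum_range_succ, ih]
      simp

lemma pvSumMapList {α : Type} (l : List α) (h : α → Nat) (d : α) :
    (l.map h).sum = ∑ j ∈ Finset.range l.length, h (l.getD j d) := by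
  induction l with
  | nil => simp
  | cons x l ih =>
      rw [List.map_cons, List.sum_cons, List.length_cons, Finset.sum_range_succ', ih]
      simp [List.getD_cons_succ, List.getD_cons_zero]
      ring

lemma pvCountP_range_sum_nat (N : Nat) (p : Nat → Bool) :
    (List.range N).countP p = ∑ i ∈ Finset.range N, (if p i then 1 else 0) := by
  induction N with
  | zero => simp
  | succ N ih =>
      rw [List.range_succ, List.countP_append, Finset.sum_range_succ, ← ih]
      simp [List.countP_cons]

lemma pvFoldlId {α β : Type} (L : List β) (st : α) : L.foldl (fun st _ => st) st = st := by
  induction L with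
  | nil => rfl
  | cons x L ih => rw [List.foldl_cons]; exact ih


lemma pvCount_eq (m n : Int) (board : List String) (f : Int → Int → PvCell)
    (cols : List (List PvCell)) (hm : 0 < m) (hn : 0 < n)
    (hRel : pvRel m n board f cols)
    (hm2 : m ≤ (board.length : Int))
    (hrow : ∀ i : Nat, i < m.toNat → n ≤ ((board.getD i "").toList.length : Int)) :
    (List.range board.length).foldl (fun (res : Int) (i : Nat) =>
      res + (((List.range (board.getD i "").toList.length).countP
        (fun (j : Nat) => f (i : Int) (j : Int) = none) : Nat) : Int)) 0
    = cols.foldl (fun res col => res + ((col.count none : Nat) : Int)) 0 := by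
  obtain ⟨hlen, hcl, hreg, hout⟩ := hRel
  rw [pvFoldlAdd, pvFoldlAdd, zero_add, zero_add]
  have hmN : m.toNat ≤ board.length := by omega
  -- the A-side sum
  have hA : (((List.range board.length).map (fun i : Nat =>
      (List.range (board.getD i "").toList.length).countP
        (fun (j : Nat) => f (i : Int) (j : Int) = none))).sum : Nat)
      = ∑ i ∈ Finset.range m.toNat, ∑ j ∈ Finset.range n.toNat,
          (if f (i : Int) (j : Int) = none then 1 else 0) := by
    rw [pvSumMapRange]
    have hsub : Finset.range m.toNat ⊆ Finset.range board.length := by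
      intro x hx
      rw [Finset.mem_range] at hx ⊢
      omega
    rw [← Finset.sum_subset hsub ?van]
    case van =>
      intro i hi hni
      rw [Finset.mem_range] at hi
      rw [Finset.mem_range] at hni
      refine List.countP_eq_zero.mpr (fun j hj => ?_)
      rw [List.mem_range] at hj
      have hg : f (i : Int) (j : Int) = pvGrid0 board (i : Int) (j : Int) :=
        hout (i : Int) (j : Int) (fun hr => by obtain ⟨a, b, c, d⟩ := hr; omega)
      simp only [hg]
      simpa using pvGrid0_isSome board i j hi hj
    refine Finset.sum_congr rfl (fun i hi => ?_)
    rw [Finset.mem_range] at hi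
    have hiL : i < board.length := by omega
    have hLn : n.toNat ≤ (board.getD i "").toList.length := by
      have := hrow i hi; omega
    rw [show (board.getD i "").toList.length
        = n.toNat + ((board.getD i "").toList.length - n.toNat) from by omega]
    rw [List.range_add, List.countP_append, List.countP_map]
    have hzero : ((List.range ((board.getD i "").toList.length - n.toNat)).countP
        ((fun (j : Nat) => decide (f (i : Int) (j : Int) = none)) ∘ (fun (j : Nat) => n.toNat + j))) = 0 := by
      refine List.countP_eq_zero.mpr (fun k hk => ?_)
      rw [List.mem_range] at hk
      simp only [Function.comp_apply, decide_eq_false_iff_not]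
      have hg : f (i : Int) ((n.toNat + k : Nat) : Int)
          = pvGrid0 board (i : Int) ((n.toNat + k : Nat) : Int) :=
        hout _ _ (fun hr => by
          obtain ⟨_, _, _, h4⟩ := hr
          omega)
      rw [hg]
      simpa using pvGrid0_isSome board i (n.toNat + k) hiL (by omega)
    rw [hzero, Nat.add_zero, pvCountP_range_sum_nat]
    refine Finset.sum_congr rfl (fun j hj => ?_)
    simp
  -- the B-side sum
  have hB : ((cols.map (fun col => col.count none)).sum : Nat)
      = ∑ j ∈ Finset.range n.toNat, ∑ i ∈ Finset.range m.toNat,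
          (if f (i : Int) (j : Int) = none then 1 else 0) := by
    rw [pvSumMapList cols _ [], hlen]
    refine Finset.sum_congr rfl (fun j hj => ?_)
    rw [Finset.mem_range] at hj
    have hcj : cols.getD j [] = cols[j]'(by omega) := by
      rw [List.getD_eq_getElem?_getD, List.getElem?_eq_getElem (by omega : j < cols.length)]
      rfl
    have hclen : (cols.getD j []).length = m.toNat := by
      rw [hcj]
      exact hcl _ (List.getElem_mem _)
    have hcount : (cols.getD j []).count none
        = (cols.getD j []).countP (fun x => x == none) := rfl
    rw [hcount, pvCountP_range (cols.getD j []) _ none, hclen, pvCountP_range_sum_nat]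
    refine Finset.sum_congr rfl (fun i hi => ?_)
    rw [Finset.mem_range] at hi
    have hrv : f (i : Int) (j : Int) = (cols.getD j []).getD i none := by
      have := hreg (i : Int) (j : Int) ⟨by positivity, by omega, by positivity, by omega⟩
      simpa using this
    rw [hrv]
    by_cases hv : (cols.getD j []).getD i none = none
    · simp [hv]
    · simp [hv]
  rw [hA, hB, Finset.sum_comm]

lemma pvInit_rel (m n : Int) (board : List String) (hm : 0 < m) (hn : 0 < n)
    (hm2 : m ≤ (board.length : Int))
    (hrow : ∀ i : Nat, i < m.toNat → n ≤ ((board.getD i "").toList.length : Int)) :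
    pvRel m n board (pvGrid0 board) (pvColsOf m n board) := by
  unfold pvColsOf
  rw [if_pos ⟨hm, hn⟩]
  refine ⟨by rw [List.length_map, List.length_range], ?_, ?_, fun i j h => rfl⟩
  · intro col hcol
    rw [List.mem_map] at hcol
    obtain ⟨j, hj, rfl⟩ := hcol
    rw [List.length_map, List.length_range]
  · rintro i j ⟨hi0, him, hj0, hjn⟩
    have hjN : j.toNat < n.toNat := by omega
    have hiN : i.toNat < m.toNat := by omega
    have hiL : i.toNat < board.length := by omega
    have hrowlen : j.toNat < (board.getD i.toNat "").toList.length := by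
      have := hrow i.toNat hiN; omega
    have hcolget : ((List.range n.toNat).map (fun j : Nat =>
        (List.range m.toNat).map (fun i : Nat =>
          some ((board.getD i "").toList.getD j ' ')))).getD j.toNat []
        = (List.range m.toNat).map (fun i : Nat =>
            some ((board.getD i "").toList.getD j.toNat ' ')) := by
      rw [List.getD_eq_getElem?_getD, List.getElem?_map, List.getElem?_range hjN]
      rfl
    rw [hcolget]
    have hget2 : ((List.range m.toNat).map (fun i : Nat =>
        some ((board.getD i "").toList.getD j.toNat ' '))).getD i.toNat none
        = some ((board.getD i.toNat "").toList.getD j.toNat ' ') := by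
      rw [List.getD_eq_getElem?_getD, List.getElem?_map, List.getElem?_range hiN]
      rfl
    rw [hget2]
    have hbg : board.getD i.toNat "" = board[i.toNat] := by
      rw [List.getD_eq_getElem?_getD, List.getElem?_eq_getElem hiL]
      rfl
    have hrowlen' : j.toNat < board[i.toNat].toList.length := by
      rw [← hbg]; exact hrowlen
    have hgd : (board.getD i.toNat "").toList.getD j.toNat ' '
        = board[i.toNat].toList[j.toNat]'hrowlen' := by
      rw [List.getD_eq_getElem?_getD]
      rw [List.getElem?_eq_getElem hrowlen]
      simp [List.getElem?_eq_getElem hiL, hbg]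
    rw [hgd]
    have h1 : PySem.List.pyGet? board i = board[i.toNat]? := by
      conv_lhs => rw [show i = ((i.toNat : Nat) : Int) from (Int.toNat_of_nonneg hi0).symm,
        PySem.List.pyGet?_natCast]
    unfold pvGrid0
    rw [h1, List.getElem?_eq_getElem hiL]
    show PySem.List.pyGet? (board[i.toNat].toList) j
      = some (board[i.toNat].toList[j.toNat]'hrowlen')
    have h2 : PySem.List.pyGet? (board[i.toNat].toList) j
        = board[i.toNat].toList[j.toNat]? := by
      conv_lhs => rw [show j = ((j.toNat : Nat) : Int) from (Int.toNat_of_nonneg hj0).symm,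
        PySem.List.pyGet?_natCast]
    rw [h2, List.getElem?_eq_getElem hrowlen']

lemma pvCheck_trivial (m n : Int) (h : ¬ (0 < m ∧ 0 < n)) (f : Int → Int → PvCell) :
    pvCheck m n f = (false, f) := by
  unfold pvCheck
  have hfa : (PySem.List.pyRange 0 m 1).foldl (fun st i =>
      (PySem.List.pyRange 0 n 1).foldl (fun st j => pvMarkCell m n f st i j) st)
      (false, fun _ _ => (0 : Int))
      = (false, fun _ _ => (0 : Int)) := by
    by_cases hm : 0 < m
    · have hn : n ≤ 0 := by
        by_contra hc
        exact h ⟨hm, by omega⟩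
      rw [show PySem.List.pyRange 0 n 1 = [] from PySem.List.pyRange_one_eq_nil hn]
      exact pvFoldlId _ _
    · rw [show PySem.List.pyRange 0 m 1 = [] from PySem.List.pyRange_one_eq_nil (by omega)]
      rfl
  rw [hfa]
  simp

lemma pvA_trivial (m n : Int) (board : List String) (h : ¬ (0 < m ∧ 0 < n)) :
    solution m n board = 0 := by
  unfold solution
  have hloop : pvLoopA (m.toNat * n.toNat + 1) m n (pvGrid0 board) = pvGrid0 board := by
    simp only [pvLoopA, pvCheck_trivial m n h, Bool.false_eq_true, if_false]
  rw [hloop, pvFoldlAdd, zero_add]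
  have : ((List.range board.length).map (fun i : Nat =>
      (List.range (board.getD i "").toList.length).countP
        (fun (j : Nat) => pvGrid0 board (i : Int) (j : Int) = none))).sum = 0 := by
    refine List.sum_eq_zero (fun x hx => ?_)
    rw [List.mem_map] at hx
    obtain ⟨i, hi, rfl⟩ := hx
    rw [List.mem_range] at hi
    refine List.countP_eq_zero.mpr (fun j hj => ?_)
    rw [List.mem_range] at hj
    simpa using pvGrid0_isSome board i j hi hj
  rw [this]
  rfl

lemma pvB_trivial (m n : Int) (board : List String) (h : ¬ (0 < m ∧ 0 < n)) :
    solution_alt m n board = 0 := by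
  unfold solution_alt pvColsOf
  rw [if_neg h]
  have hblocks : pvBlocks m ([] : List (List PvCell)) = [] := rfl
  simp only [pvLoopB, hblocks, if_pos rfl]
  rfl

-- ===== VERDICT (by name: the statement is the Claim_ definition above) =====
theorem solution_spec : Claim_equal_solution := by
  intro m n board hDom hPre
  unfold Spec_solution
  by_cases hmn : 0 < m ∧ 0 < n
  · obtain ⟨hm, hn⟩ := hmn
    obtain ⟨hm2, hrow⟩ := hPre hm hn
    show solution m n board = solution_alt m n board
    unfold solution solution_alt
    exact pvCount_eq m n board _ _ hm hn
      (pvLoop_rel m n board hm hn _ _ _ (pvInit_rel m n board hm hn hm2 hrow)) hm2 hrow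
  · show solution m n board = solution_alt m n board
    rw [pvA_trivial m n board hmn, pvB_trivial m n board hmn]
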